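-- pv_equiv track=rewrite | github.com/centricconsulting/agent_c_framework | src/agent_c_core/src/agent_c/models/chat_history/enhanced_chat_session.py | _group_messages_into_interactions
-- ===== SOURCE A (Python) =====
-- from typing import Optional, Dict, Any, List, Union
--
-- def _group_messages_into_interactions(
--
--     messages: List[dict[str, Any]]
-- ) -> List[List[dict[str, Any]]]:
--     """
--     Group legacy messages into logical interactions.
--
--     An interaction typically consists of:
--     1. User message
--     2. Optional tool calls and results
--     3. Assistant response
--
--     Args:
--         messages: List of legacy message dictionaries
--
--     Returns:
--         List of interaction groups (each group is a list of messages)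
--     """
--     if not messages:
--         return []
--
--     interactions = []
--     current_interaction = []
--
--     for msg in messages:
--         role = msg.get("role", "")
--
--         # Start new interaction on user message (unless it's the first message)
--         if role == "user" and current_interaction:
--             # Save current interaction and start new one
--             interactions.append(current_interaction)
--             current_interaction = [msg]
--         else:
--             current_interaction.append(msg)
--
--     # Add the last interaction if it has messages
--     if current_interaction:
--         interactions.append(current_interaction)
--
--     return interactions
-- ===== SOURCE B (Python) =====
-- from typing import Any, List
--
--
-- def _group_messages_into_interactions(
--     messages: List[dict[str, Any]]
-- ) -> List[List[dict[str, Any]]]: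
--     """Split messages into maximal spans: each span starts at its first message
--     and runs until just before the next message with role == "user"."""
--     if not messages:
--         return []
--     interactions = []
--     rest = messages
--     while rest:
--         j = 1
--         while j < len(rest) and rest[j].get("role", "") != "user":
--             j += 1
--         interactions.append(rest[:j])
--         rest = rest[j:]
--     return interactions
-- ===== Notes on version B (the rewrite author's own statement) =====
-- stated objective: alternative
-- what changed: Replaces A's accumulate-and-flush loop (append to current group, flush on each later user message, final flush) with a span-cutting loop: repeatedly scan forward for the next user boundary and slice off one whole interaction at a time.
import Mathlib
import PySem

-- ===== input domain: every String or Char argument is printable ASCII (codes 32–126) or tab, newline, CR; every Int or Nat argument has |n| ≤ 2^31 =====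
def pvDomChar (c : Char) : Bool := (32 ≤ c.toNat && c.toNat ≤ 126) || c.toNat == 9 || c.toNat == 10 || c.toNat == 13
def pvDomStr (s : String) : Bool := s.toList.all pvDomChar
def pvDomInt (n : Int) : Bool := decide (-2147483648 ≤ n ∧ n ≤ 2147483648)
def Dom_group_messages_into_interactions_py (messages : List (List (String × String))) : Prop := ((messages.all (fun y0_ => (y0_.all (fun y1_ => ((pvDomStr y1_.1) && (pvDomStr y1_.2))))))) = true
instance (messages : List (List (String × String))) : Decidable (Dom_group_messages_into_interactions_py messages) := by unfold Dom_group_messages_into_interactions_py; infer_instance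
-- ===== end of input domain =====

-- B changes the decomposition: instead of A's accumulate-and-flush loop, B cuts whole
-- interaction spans, scanning ahead to the next "user" boundary and slicing (objective: alternative).

-- ===== PORT A =====
-- the body of A's for-loop (one step of the accumulate-and-flush state machine)
def pvStepA (st : List (List (List (String × String))) × List (List (String × String)))
    (msg : List (String × String)) :
    List (List (List (String × String))) × List (List (String × String)) :=
  if PySem.Dict.getD (PySem.Dict.mk msg) "role" "" == "user" && !st.2.isEmpty then
    (st.1 ++ [st.2], [msg])
  else
    (st.1, st.2 ++ [msg])

-- A's trailing "add the last interaction if it has messages"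
def pvFinishA (st : List (List (List (String × String))) × List (List (String × String))) :
    List (List (List (String × String))) :=
  if st.2.isEmpty then st.1 else st.1 ++ [st.2]

def group_messages_into_interactions_py (messages : List (List (String × String))) : List (List (List (String × String))) :=
  if messages.isEmpty then [] else pvFinishA (messages.foldl pvStepA ([], []))

-- ===== PORT B =====
-- inner while loop of Source B: advance j while j < len(rest) and rest[j].get("role","") != "user"
-- (rest.getD j [] is exact for rest[j] here since the loop guard gives j < rest.length)
def pvScanB (rest : List (List (String × String))) (j : Nat) : Nat :=
  if h : j < rest.length then
    if PySem.Dict.getD (PySem.Dict.mk (rest.getD j [])) "role" "" == "user" then j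
    else pvScanB rest (j + 1)
  else j
termination_by rest.length - j

theorem pvScanB_ge (rest : List (List (String × String))) (j : Nat) : j ≤ pvScanB rest j := by
  fun_induction pvScanB rest j <;> omega

-- outer while loop of Source B: slice off rest[:j], continue on rest[j:]
def pvOuterB (rest : List (List (String × String))) : List (List (List (String × String))) :=
  if hr : rest.isEmpty then [] else
    PySem.List.slice rest (some (0 : Int)) (some ((pvScanB rest 1 : Nat) : Int)) ::
      pvOuterB (PySem.List.slice rest (some ((pvScanB rest 1 : Nat) : Int)) none)
termination_by rest.length
decreasing_by
  rw [PySem.List.slice_from_natCast]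
  have h1 : 1 ≤ pvScanB rest 1 := pvScanB_ge rest 1
  have h0 : rest.length ≠ 0 := by simpa [List.isEmpty_iff_length_eq_zero] using hr
  simp only [List.length_drop]
  omega

def group_messages_into_interactions_py_alt (messages : List (List (String × String))) : List (List (List (String × String))) :=
  if messages.isEmpty then [] else pvOuterB messages

-- ===== PRECONDITION & SPEC =====
def Spec_group_messages_into_interactions_py (messages : List (List (String × String))) (out : List (List (List (String × String)))) : Prop := out = group_messages_into_interactions_py_alt messages
instance (messages : List (List (String × String))) (out : List (List (List (String × String)))) : Decidable (Spec_group_messages_into_interactions_py messages out) := by unfold Spec_group_messages_into_interactions_py; infer_instance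

-- ===== CLAIM (what is proved, stated in full; the proofs are below) =====
def Claim_equal_group_messages_into_interactions_py : Prop := ∀ (messages : List (List (String × String))), Dom_group_messages_into_interactions_py messages → Spec_group_messages_into_interactions_py messages (group_messages_into_interactions_py messages)

-- ===== LEMMAS AND PROOFS =====

-- `true` iff the message is NOT a user message (the span-continuation predicate)
def pvCont (msg : List (String × String)) : Bool :=
  !(PySem.Dict.getD (PySem.Dict.mk msg) "role" "" == "user")

-- common reference shape: head message plus the non-user span, then recurse
def pvGroups : List (List (String × String)) → List (List (List (String × String)))
  | [] => []
  | m :: ms => (m :: ms.takeWhile pvCont) :: pvGroups (ms.dropWhile pvCont)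
termination_by l => l.length
decreasing_by
  simp only [List.length_cons]
  exact Nat.lt_succ_of_le (List.dropWhile_sublist pvCont).length_le

theorem pvGroups_nil : pvGroups [] = [] := by rw [pvGroups]

theorem pvGroups_cons (m : List (String × String)) (ms : List (List (String × String))) :
    pvGroups (m :: ms) = (m :: ms.takeWhile pvCont) :: pvGroups (ms.dropWhile pvCont) := by
  rw [pvGroups]

-- A's loop with a nonempty current group, expressed recursively
def pvGo (cur : List (List (String × String))) : List (List (String × String)) → List (List (List (String × String)))
  | [] => [cur]
  | m :: ms => if pvCont m then pvGo (cur ++ [m]) ms else cur :: pvGo [m] ms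

theorem pvGo_span (ms : List (List (String × String))) :
    ∀ cur, pvGo cur ms = (cur ++ ms.takeWhile pvCont) :: pvGroups (ms.dropWhile pvCont) := by
  induction ms with
  | nil => intro cur; simp [pvGo, pvGroups_nil]
  | cons m ms ih =>
    intro cur
    by_cases h : pvCont m = true
    · simp [pvGo, h, ih (cur ++ [m])]
    · simp only [Bool.not_eq_true] at h
      simp [pvGo, h, pvGroups_cons, ih [m]]

theorem pvFoldA (ms : List (List (String × String))) :
    ∀ (acc : List (List (List (String × String)))) (cur : List (List (String × String))), cur ≠ [] →
    pvFinishA (ms.foldl pvStepA (acc, cur)) = acc ++ pvGo cur ms := by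
  induction ms with
  | nil =>
    intro acc cur hcur
    simp [pvFinishA, pvGo, List.isEmpty_iff, hcur]
  | cons m ms ih =>
    intro acc cur hcur
    by_cases h : (PySem.Dict.getD (PySem.Dict.mk m) "role" "" == "user") = true
    · have hstep : pvStepA (acc, cur) m = (acc ++ [cur], [m]) := by
        simp [pvStepA, h, hcur]
      rw [List.foldl_cons, hstep, ih (acc ++ [cur]) [m] (by simp)]
      simp [pvGo, pvCont, h]
    · have hstep : pvStepA (acc, cur) m = (acc, cur ++ [m]) := by
        simp [pvStepA, h]
      rw [List.foldl_cons, hstep, ih acc (cur ++ [m]) (by simp)]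
      simp [pvGo, pvCont, h]

theorem pvScanB_spec (rest : List (List (String × String))) (j : Nat) :
    pvScanB rest j = j + ((rest.drop j).takeWhile pvCont).length := by
  fun_induction pvScanB rest j with
  | case1 j h hu =>
    rw [List.drop_eq_getElem_cons h]
    have hc : pvCont rest[j] = false := by
      simp only [pvCont, Bool.not_eq_eq_eq_not]
      simpa [List.getD_eq_getElem?_getD, List.getElem?_eq_getElem h] using hu
    simp [hc]
  | case2 j h hu ih =>
    have hc : pvCont rest[j] = true := by
      simp only [pvCont, Bool.not_eq_true']
      simpa [List.getD_eq_getElem?_getD, List.getElem?_eq_getElem h] using hu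
    rw [ih, List.drop_eq_getElem_cons h, List.takeWhile_cons, if_pos hc, List.length_cons]
    omega
  | case3 j h =>
    have : rest.drop j = [] := List.drop_eq_nil_of_le (by omega)
    simp [this]

theorem pvOuterB_eq_pvGroups (rest : List (List (String × String))) :
    pvOuterB rest = pvGroups rest := by
  have key : ∀ (n : Nat) (rest : List (List (String × String))), rest.length ≤ n →
      pvOuterB rest = pvGroups rest := by
    intro n
    induction n with
    | zero =>
      intro rest hlen
      have : rest = [] := List.eq_nil_of_length_eq_zero (by omega)
      subst this
      rw [pvOuterB]
      simp [pvGroups_nil]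
    | succ n ih =>
      intro rest hlen
      cases rest with
      | nil => rw [pvOuterB]; simp [pvGroups_nil]
      | cons m ms =>
        have hscan : pvScanB (m :: ms) 1 = 1 + (ms.takeWhile pvCont).length := by
          rw [pvScanB_spec]; simp
        have htw : ms.take (ms.takeWhile pvCont).length = ms.takeWhile pvCont := by
          nth_rewrite 2 [← List.takeWhile_append_dropWhile (p := pvCont) (l := ms)]
          exact List.take_left' rfl
        have hdw : ms.drop (ms.takeWhile pvCont).length = ms.dropWhile pvCont := by
          nth_rewrite 2 [← List.takeWhile_append_dropWhile (p := pvCont) (l := ms)]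
          exact List.drop_left' rfl
        rw [pvOuterB]
        simp only [List.isEmpty_cons, Bool.false_eq_true, ↓reduceDIte, hscan,
          PySem.List.slice_zero_start, PySem.List.slice_to_natCast, PySem.List.slice_from_natCast]
        have hdrop : (m :: ms).drop (1 + (ms.takeWhile pvCont).length) = ms.dropWhile pvCont := by
          rw [Nat.add_comm, List.drop_succ_cons, hdw]
        have htake : (m :: ms).take (1 + (ms.takeWhile pvCont).length) = m :: ms.takeWhile pvCont := by
          rw [Nat.add_comm, List.take_succ_cons, htw]
        rw [hdrop, htake, ih (ms.dropWhile pvCont)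
          (by have := (List.dropWhile_sublist (l := ms) pvCont).length_le; simp at hlen; omega)]
        rw [pvGroups_cons]
  exact key rest.length rest le_rfl

-- ===== VERDICT (by name: the statement is the Claim_ definition above) =====
theorem group_messages_into_interactions_py_spec : Claim_equal_group_messages_into_interactions_py := by
  intro messages _
  unfold Spec_group_messages_into_interactions_py
  unfold group_messages_into_interactions_py group_messages_into_interactions_py_alt
  cases messages with
  | nil => simp
  | cons m ms =>
    simp only [List.isEmpty_cons, Bool.false_eq_true, if_false]
    rw [pvOuterB_eq_pvGroups]
    have hstep0 : pvStepA ([], []) m = ([], [m]) := by simp [pvStepA]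
    rw [List.foldl_cons, hstep0, pvFoldA ms [] [m] (by simp), pvGo_span]
    simp [pvGroups_cons]
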